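-- pv_equiv track=rewrite | github.com/peskywyvern/homework8 | 82.py | remove_string_doubles
-- ===== SOURCE A (Python) =====
-- def remove_string_doubles(strings: list) -> list:
--     new_list = []
--     for word in strings:
--         counter = 0
--         for character in word:
--             counter += word.count(character)
--         if counter == len(word):
--             new_list.append(word)
--     return new_list
-- ===== SOURCE B (Python) =====
-- def _all_distinct(word):
--     chars = sorted(word)
--     for a, b in zip(chars, chars[1:]):
--         if a == b:
--             return False
--     return True
--
--
-- def remove_string_doubles(strings: list) -> list:
--     return [word for word in strings if _all_distinct(word)]
-- ===== Notes on version B (the rewrite author's own statement) =====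
-- stated objective: alternative
-- what changed: B sorts each word's characters and rejects the word iff some adjacent pair of the sorted list is equal (duplicates become adjacent after sorting), and builds the result as a comprehension/filter, replacing A's per-character word.count inner scans and accumulator loop.
import Mathlib
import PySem

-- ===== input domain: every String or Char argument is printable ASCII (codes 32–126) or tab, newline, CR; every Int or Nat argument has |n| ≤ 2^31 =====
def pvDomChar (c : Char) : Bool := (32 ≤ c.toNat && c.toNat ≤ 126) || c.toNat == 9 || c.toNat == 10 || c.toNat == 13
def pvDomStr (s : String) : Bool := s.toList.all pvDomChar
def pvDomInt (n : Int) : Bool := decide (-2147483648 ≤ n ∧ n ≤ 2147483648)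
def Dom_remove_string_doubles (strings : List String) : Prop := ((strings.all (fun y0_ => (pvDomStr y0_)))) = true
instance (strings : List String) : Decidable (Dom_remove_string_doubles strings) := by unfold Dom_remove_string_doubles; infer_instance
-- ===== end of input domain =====

-- B sorts each word's characters and rejects the word iff some adjacent sorted pair is equal,
-- built as a filter — a different algorithm from A's per-character word.count inner scans (alternative, not faster).


-- ===== PORT A =====
-- iterating a Python str yields its characters; word.count(character) is PySem.Str.count
def remove_string_doubles (strings : List String) : List String :=
  strings.foldl (fun new_list word =>
    let counter : Int :=
      word.toList.foldl (fun counter character =>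
        counter + (PySem.Str.count word (String.ofList [character]) : Int)) 0
    if counter = PySem.Str.len word then new_list ++ [word] else new_list) []

-- ===== PORT B =====
-- the 'for a, b in zip(chars, chars[1:]): if a == b: return False' loop of _all_distinct
def allDistinctGo : List (Char × Char) → Bool
  | [] => true
  | (a, b) :: rest => if a == b then false else allDistinctGo rest

def allDistinct (word : String) : Bool :=
  let chars := PySem.List.sorted word.toList (fun c => c) false
  allDistinctGo (chars.zip chars.tail)

def remove_string_doubles_alt (strings : List String) : List String :=
  strings.filter (fun word => allDistinct word)

-- ===== PRECONDITION & SPEC =====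
def Spec_remove_string_doubles (strings : List String) (out : List String) : Prop := out = remove_string_doubles_alt strings
instance (strings : List String) (out : List String) : Decidable (Spec_remove_string_doubles strings out) := by unfold Spec_remove_string_doubles; infer_instance

-- ===== CLAIM (what is proved, stated in full; the proofs are below) =====
def Claim_equal_remove_string_doubles : Prop := ∀ (strings : List String), Dom_remove_string_doubles strings → Spec_remove_string_doubles strings (remove_string_doubles strings)

-- ===== LEMMAS AND PROOFS =====

-- count.go with a singleton needle counts occurrences of the character
lemma count_go_singleton (c : Char) : ∀ (l : List Char) (fuel acc : Nat), l.length ≤ fuel →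
    PySem.Chars.count.go [c] fuel l acc = acc + l.count c := by
  intro l
  induction l with
  | nil => intro fuel acc _; cases fuel <;> simp [PySem.Chars.count.go]
  | cons h t ih =>
    intro fuel acc hf
    cases fuel with
    | zero => simp at hf
    | succ f =>
      by_cases hc : h = c
      · subst hc
        simp only [PySem.Chars.count.go, List.isPrefixOf, BEq.rfl, Bool.and_self, if_true,
          List.length_cons, List.length_nil, List.drop_succ_cons, List.drop_zero,
          List.count_cons_self]
        rw [ih f (acc + 1) (by simpa using Nat.le_of_succ_le_succ hf)]
        omega
      · have hbe : ([c].isPrefixOf (h :: t)) = false := by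
          simp [List.isPrefixOf]
          exact fun hce => hc hce.symm
        simp only [PySem.Chars.count.go, hbe, Bool.false_eq_true, if_false]
        rw [ih f acc (Nat.le_of_succ_le_succ hf)]
        rw [List.count_cons_of_ne (by simpa using hc)]

lemma chars_count_singleton (cs : List Char) (c : Char) :
    PySem.Chars.count cs [c] = cs.count c := by
  simp only [PySem.Chars.count, List.isEmpty_cons, Bool.false_eq_true, if_false]
  simpa using count_go_singleton c cs cs.length 0 le_rfl

-- A's inner loop is the sum of the per-character counts
lemma counter_eq_sum (cs : List Char) :
    ∀ (l : List Char) (a : Int),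
      l.foldl (fun counter character => counter + (cs.count character : Int)) a
        = a + ((l.map (fun character => (cs.count character : Int))).sum) := by
  intro l
  induction l with
  | nil => intro a; simp
  | cons h t ih => intro a; simp [ih]; ring

lemma length_le_sum_counts (cs : List Char) : ∀ (l : List Char), (∀ x ∈ l, 1 ≤ cs.count x) →
    (l.length : Int) ≤ (l.map (fun character => (cs.count character : Int))).sum := by
  intro l
  induction l with
  | nil => intro _; simp
  | cons h t ih =>
    intro hpos
    have h1 : 1 ≤ cs.count h := hpos h (by simp)
    have h2 := ih (fun x hx => hpos x (by simp [hx]))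
    simp only [List.map_cons, List.sum_cons, List.length_cons]
    push_cast
    omega

-- arithmetic core: a sum of per-element counts equals the length iff every count is 1
lemma sum_counts_eq_length_iff_aux (cs : List Char) : ∀ (l : List Char),
    (∀ x ∈ l, 1 ≤ cs.count x) →
    (((l.map (fun character => (cs.count character : Int))).sum = (l.length : Int))
      ↔ ∀ c ∈ l, cs.count c = 1) := by
  intro l
  induction l with
  | nil => intro _; simp
  | cons h t ih =>
    intro hpos
    have h1 : 1 ≤ cs.count h := hpos h (by simp)
    have ht : ∀ x ∈ t, 1 ≤ cs.count x := fun x hx => hpos x (by simp [hx])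
    have hlb := length_le_sum_counts cs t ht
    have iht := ih ht
    simp only [List.map_cons, List.sum_cons, List.length_cons, List.mem_cons]
    constructor
    · intro heq
      push_cast at heq
      have hc1 : cs.count h = 1 := by omega
      have hs : (t.map (fun character => (cs.count character : Int))).sum = (t.length : Int) := by
        omega
      rintro c (rfl | hc)
      · exact hc1
      · exact iht.mp hs c hc
    · intro hall
      have hc1 : cs.count h = 1 := hall h (Or.inl rfl)
      have hs := iht.mpr (fun c hc => hall c (Or.inr hc))
      push_cast
      omega

lemma sum_counts_eq_length_iff (cs : List Char) :
    ((cs.map (fun character => (cs.count character : Int))).sum = (cs.length : Int))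
      ↔ ∀ c ∈ cs, cs.count c = 1 :=
  sum_counts_eq_length_iff_aux cs cs (fun x hx => List.one_le_count_iff.mpr hx)

-- the zip-with-tail scan succeeds iff adjacent elements are pairwise distinct
lemma allDistinctGo_zip_tail : ∀ (l : List Char),
    allDistinctGo (l.zip l.tail) = true ↔ l.IsChain (· ≠ ·) := by
  intro l
  induction l with
  | nil => simp [allDistinctGo]
  | cons a t ih =>
    cases t with
    | nil => simp [allDistinctGo]
    | cons b t' =>
      simp only [List.tail_cons, List.zip_cons_cons, allDistinctGo, List.isChain_cons_cons]
      by_cases hab : a = b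
      · simp [hab]
      · have hbe : (a == b) = false := by simpa using hab
        rw [hbe]
        simp only [Bool.false_eq_true, if_false]
        have iht := ih
        simp only [List.tail_cons] at iht
        rw [iht]
        simp [hab]

-- B's per-word test holds iff the word's characters are pairwise distinct
lemma allDistinct_iff_nodup (word : String) :
    allDistinct word = true ↔ word.toList.Nodup := by
  unfold allDistinct
  simp only
  set s := PySem.List.sorted word.toList (fun c => c) false with hs
  have hperm : s.Perm word.toList := PySem.List.sorted_perm _ _ _
  have hle : s.Pairwise (fun a b => a ≤ b) := PySem.List.sorted_pairwise _ _
  rw [allDistinctGo_zip_tail]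
  constructor
  · intro hchain
    have hchle : s.IsChain (fun a b => a ≤ b) := hle.isChain
    have hlt : s.IsChain (· < ·) := by
      rw [List.isChain_iff_forall_rel_of_append_cons_cons] at hchle hchain ⊢
      intro a b l₁ l₂ hsplit
      exact lt_of_le_of_ne (hchle hsplit) (hchain hsplit)
    have hpw : s.Pairwise (· < ·) := List.isChain_iff_pairwise.mp hlt
    exact hperm.nodup_iff.mp (hpw.imp ne_of_lt)
  · intro hnd
    exact (hperm.nodup_iff.mpr hnd).isChain

-- A's per-word test equals B's
lemma cond_eq (word : String) :
    ((word.toList.foldl (fun counter character =>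
        counter + (PySem.Str.count word (String.ofList [character]) : Int)) 0)
      = PySem.Str.len word)
    ↔ allDistinct word = true := by
  have hc : ∀ character, PySem.Str.count word (String.ofList [character])
      = word.toList.count character := by
    intro character
    have hm : (String.ofList [character]).toList = [character] := by simp
    rw [PySem.Str.count_eq, hm]
    exact chars_count_singleton word.toList character
  simp only [hc]
  rw [counter_eq_sum word.toList word.toList 0, zero_add]
  have hlen : PySem.Str.len word = (word.toList.length : Int) := by
    simp [PySem.Str.len_eq]
  rw [hlen, sum_counts_eq_length_iff, allDistinct_iff_nodup,
    List.nodup_iff_count_eq_one]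

-- ===== VERDICT (by name: the statement is the Claim_ definition above) =====
theorem remove_string_doubles_spec : Claim_equal_remove_string_doubles := by
  intro strings _
  unfold Spec_remove_string_doubles remove_string_doubles remove_string_doubles_alt
  rw [PySem.List.foldl_append_ite_eq_filter]
  rw [List.nil_append]
  apply List.filter_congr
  intro word _
  rcases Bool.eq_false_or_eq_true (allDistinct word) with hb | hb
  · rw [hb]
    exact decide_eq_true ((cond_eq word).mpr hb)
  · rw [hb]
    apply decide_eq_false
    intro hh
    have := (cond_eq word).mp hh
    rw [hb] at this
    simp at this
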